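-- pv_equiv track=rewrite | github.com/liyanghua/-OS | apps/intel_hub/extractor/signal_extractor.py | _match_dict_comments
-- ===== SOURCE A (Python) =====
-- def _match_dict(text: str, keyword_dict: dict[str, list[str]]) -> list[str]:
--     text_lower = text.lower()
--     return [
--         label
--         for label, keywords in keyword_dict.items()
--         if any(kw.lower() in text_lower for kw in keywords)
--     ]
--
-- def _match_dict_comments(
--     comments: list[str], keyword_dict: dict[str, list[str]]
-- ) -> list[str]:
--     results: list[str] = []
--     for comment in comments:
--         matched = _match_dict(comment, keyword_dict)
--         results.extend(m for m in matched if m not in results)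
--     return results
-- ===== SOURCE B (Python) =====
-- def _match_dict_comments(comments, keyword_dict):
--     # Inverted (label-major) algorithm: for each label find the index of the
--     # first comment containing any of its keywords, bucket labels by that
--     # index, and concatenate the buckets; no incremental dedup needed.
--     lowered = [c.lower() for c in comments]
--     buckets = [[] for _ in lowered]
--     for label, kws in keyword_dict.items():
--         lkws = [kw.lower() for kw in kws]
--         idx = next((i for i, t in enumerate(lowered) if any(k in t for k in lkws)), None)
--         if idx is not None:
--             buckets[idx].append(label)
--     return [label for b in buckets for label in b]
-- ===== Notes on version B (the rewrite author's own statement) =====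
-- stated objective: faster
-- what changed: B inverts the loop nesting: instead of A's comment-major scan that re-matches every label against every comment and dedups with a membership test on the growing result list, B does one label-major pass computing each label's first matching comment index (stopping at the first hit), buckets labels by that index and concatenates the buckets, which yields the same first-occurrence order with no dedup at all.
import Mathlib
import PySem

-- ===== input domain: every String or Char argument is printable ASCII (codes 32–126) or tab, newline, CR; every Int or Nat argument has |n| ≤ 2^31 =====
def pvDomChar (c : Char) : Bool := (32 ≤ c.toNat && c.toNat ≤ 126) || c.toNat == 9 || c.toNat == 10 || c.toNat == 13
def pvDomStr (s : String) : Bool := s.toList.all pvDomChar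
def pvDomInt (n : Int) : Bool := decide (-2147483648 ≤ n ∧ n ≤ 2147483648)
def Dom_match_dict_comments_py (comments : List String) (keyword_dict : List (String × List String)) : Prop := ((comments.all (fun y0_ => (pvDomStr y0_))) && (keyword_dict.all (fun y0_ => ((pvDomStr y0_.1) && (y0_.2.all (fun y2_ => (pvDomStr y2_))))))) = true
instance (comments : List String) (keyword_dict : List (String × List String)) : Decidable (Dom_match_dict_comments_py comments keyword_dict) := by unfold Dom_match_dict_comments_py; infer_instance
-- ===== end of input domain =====

-- B inverts the loop nesting: label-major scan that finds each label's first
-- matching comment, buckets labels by that index and concatenates the buckets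
-- (alternative decomposition; no incremental membership dedup).

-- ===== PORT A =====
-- _match_dict: list comprehension = filter + map
def pvMatchDict (text : String) (kd : List (String × List String)) : List String :=
  let tl := PySem.Str.lower text
  (kd.filter (fun p => p.2.any (fun kw => PySem.Str.isIn (PySem.Str.lower kw) tl))).map (fun p => p.1)

-- results.extend(m for m in matched if m not in results): the generator sees
-- the growing results list, so it is a left fold appending if absent
def pvIns (res : List String) (m : String) : List String :=
  if res.contains m then res else res ++ [m]

def match_dict_comments_py (comments : List String) (keyword_dict : List (String × List String)) : List String :=
  comments.foldl (fun results comment => (pvMatchDict comment keyword_dict).foldl pvIns results) []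

-- ===== PORT B =====
-- next((i for i, t in enumerate(lowered) if any(k in t for k in lkws)), None)
def pvFirstIdx (lkws : List String) : List String → Option Nat
  | [] => none
  | t :: ts => if lkws.any (fun k => PySem.Str.isIn k t) then some 0
               else (pvFirstIdx lkws ts).map (· + 1)

-- buckets[i].append(x)
def pvAppendAt : List (List String) → Nat → String → List (List String)
  | [], _, _ => []
  | b :: bs, 0, x => (b ++ [x]) :: bs
  | b :: bs, n+1, x => b :: pvAppendAt bs n x

-- body of the for-loop over keyword_dict.items()
def pvBStep (lowered : List String) (bs : List (List String)) (p : String × List String) : List (List String) :=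
  match pvFirstIdx (p.2.map PySem.Str.lower) lowered with
  | none => bs
  | some i => pvAppendAt bs i p.1

def match_dict_comments_py_alt (comments : List String) (keyword_dict : List (String × List String)) : List String :=
  let lowered := comments.map PySem.Str.lower
  (keyword_dict.foldl (pvBStep lowered) (lowered.map (fun _ => ([] : List String)))).flatten

-- ===== PRECONDITION & SPEC =====
-- Pre_ excludes only association lists with a repeated label: a Python dict
-- cannot have duplicate keys, so such lists correspond to no input of A.
def Pre_match_dict_comments_py (comments : List String) (keyword_dict : List (String × List String)) : Prop :=
  (keyword_dict.map Prod.fst).Nodup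
instance (comments : List String) (keyword_dict : List (String × List String)) : Decidable (Pre_match_dict_comments_py comments keyword_dict) := by unfold Pre_match_dict_comments_py; infer_instance

def pvWitness_match_dict_comments_py : List String × (List (String × List String)) :=
  (["Fix the race in the scheduler"], [("bug", ["race", "crash"]), ("perf", ["slow"])])

def Spec_match_dict_comments_py (comments : List String) (keyword_dict : List (String × List String)) (out : List String) : Prop := out = match_dict_comments_py_alt comments keyword_dict
instance (comments : List String) (keyword_dict : List (String × List String)) (out : List String) : Decidable (Spec_match_dict_comments_py comments keyword_dict out) := by unfold Spec_match_dict_comments_py; infer_instance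

-- ===== CLAIM (what is proved, stated in full; the proofs are below) =====
def Claim_equal_match_dict_comments_py : Prop := ∀ (comments : List String) (keyword_dict : List (String × List String)), Dom_match_dict_comments_py comments keyword_dict → Pre_match_dict_comments_py comments keyword_dict → Spec_match_dict_comments_py comments keyword_dict (match_dict_comments_py comments keyword_dict)

-- ===== LEMMAS AND PROOFS =====

-- common reference: process comments front to back, discarding matched labels
def pvMatches (t : String) (p : String × List String) : Bool :=
  p.2.any (fun kw => PySem.Str.isIn (PySem.Str.lower kw) (PySem.Str.lower t))

def pvSpecRef : List String → List (String × List String) → List String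
  | [], _ => []
  | c :: cs, kd =>
      (kd.filter (pvMatches c)).map Prod.fst ++ pvSpecRef cs (kd.filter (fun p => !pvMatches c p))

-- ---- B = pvSpecRef ----
theorem pvB_cons (t : String) (lts : List String) :
    ∀ (kd : List (String × List String)) (b0 : List String) (bs : List (List String)),
    kd.foldl (pvBStep (PySem.Str.lower t :: lts)) (b0 :: bs)
      = (b0 ++ (kd.filter (pvMatches t)).map Prod.fst)
        :: (kd.filter (fun p => !pvMatches t p)).foldl (pvBStep lts) bs := by
  intro kd
  induction kd with
  | nil => intro b0 bs; simp
  | cons p kd ih =>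
    intro b0 bs
    have hany : ((p.2.map PySem.Str.lower).any (fun k => PySem.Str.isIn k (PySem.Str.lower t)))
        = pvMatches t p := by
      rw [List.any_map]; rfl
    by_cases h : pvMatches t p = true
    · have hstep : pvBStep (PySem.Str.lower t :: lts) (b0 :: bs) p = (b0 ++ [p.1]) :: bs := by
        simp only [pvBStep, pvFirstIdx, hany, h, if_pos]
        rfl
      simp only [List.foldl_cons, hstep, List.filter_cons, h, if_pos, Bool.not_true]
      rw [ih (b0 ++ [p.1]) bs]
      simp
    · have h' : pvMatches t p = false := by
        cases hb : pvMatches t p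
        · rfl
        · exact absurd hb h
      have hstep : pvBStep (PySem.Str.lower t :: lts) (b0 :: bs) p = b0 :: pvBStep lts bs p := by
        simp only [pvBStep, pvFirstIdx, hany, h', if_neg, Bool.false_eq_true, not_false_iff]
        cases hfi : pvFirstIdx (p.2.map PySem.Str.lower) lts with
        | none => rfl
        | some j => simp [pvAppendAt]
      simp only [List.foldl_cons, hstep, List.filter_cons, h', Bool.not_false]
      rw [ih b0 (pvBStep lts bs p)]
      simp
  
theorem pvB_nil : ∀ (kd : List (String × List String)),
    kd.foldl (pvBStep []) [] = [] := by
  intro kd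
  induction kd with
  | nil => rfl
  | cons p kd ih => simpa [pvBStep, pvFirstIdx] using ih

theorem pvB_spec : ∀ (cs : List String) (kd : List (String × List String)),
    match_dict_comments_py_alt cs kd = pvSpecRef cs kd := by
  intro cs
  induction cs with
  | nil =>
    intro kd
    simp only [match_dict_comments_py_alt, List.map_nil]
    rw [pvB_nil kd]
    rfl
  | cons c cs ih =>
    intro kd
    simp only [match_dict_comments_py_alt, List.map_cons]
    rw [pvB_cons c (cs.map PySem.Str.lower) kd [] ((cs.map PySem.Str.lower).map (fun _ => ([] : List String)))]
    simp only [List.flatten_cons, List.nil_append, pvSpecRef]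
    congr 1
    have := ih (kd.filter (fun p => !pvMatches c p))
    simpa only [match_dict_comments_py_alt] using this

-- ---- A = pvSpecRef (under Nodup labels) ----
theorem pvIns_fold (l : List String) :
    ∀ res : List String, l.Nodup → l.foldl pvIns res = res ++ l.filter (fun a => !res.contains a) := by
  induction l with
  | nil => intro res _; simp
  | cons a l ih =>
    intro res hnd
    have hal : a ∉ l := (List.nodup_cons.mp hnd).1
    have hl : l.Nodup := (List.nodup_cons.mp hnd).2
    by_cases h : res.contains a = true
    · have hins : pvIns res a = res := by
        simp [pvIns]
        exact List.contains_iff_mem.mp h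
      simp only [List.foldl_cons, hins, List.filter_cons, h, Bool.not_true, if_neg,
        Bool.false_eq_true, not_false_iff]
      exact ih res hl
    · have h' : res.contains a = false := Bool.eq_false_iff.mpr h
      have hins : pvIns res a = res ++ [a] := by
        simp [pvIns]
        exact fun hm => h (List.contains_iff_mem.mpr hm)
      have hfc : l.filter (fun b => !(res ++ [a]).contains b) = l.filter (fun b => !res.contains b) := by
        apply List.filter_congr
        intro b hb
        simp
        intro _ hba
        exact hal (hba ▸ hb)
      simp only [List.foldl_cons, hins, List.filter_cons, h', Bool.not_false, if_pos]
      rw [ih (res ++ [a]) hl, hfc, List.append_assoc, List.singleton_append]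

theorem pvMatchDict_eq (c : String) (kd : List (String × List String)) :
    pvMatchDict c kd = (kd.filter (pvMatches c)).map Prod.fst := rfl

theorem pv_filter_map_fst (q : String → Bool) :
    ∀ kd : List (String × List String),
    ((kd.map Prod.fst).filter q) = (kd.filter (fun p => q p.1)).map Prod.fst := by
  intro kd
  induction kd with
  | nil => rfl
  | cons p kd ih =>
    simp only [List.map_cons, List.filter_cons]
    cases h : q p.1 <;> simp [ih]

theorem pvA_main :
    ∀ (cs : List String) (kd : List (String × List String)) (res : List String),
    (kd.map Prod.fst).Nodup →
    cs.foldl (fun r c => (pvMatchDict c kd).foldl pvIns r) res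
      = res ++ pvSpecRef cs (kd.filter (fun p => !res.contains p.1)) := by
  intro cs
  induction cs with
  | nil => intro kd res _; simp [pvSpecRef]
  | cons c cs ih =>
    intro kd res hnd
    have hMnd : (pvMatchDict c kd).Nodup := by
      rw [pvMatchDict_eq]
      exact List.Nodup.sublist ((List.filter_sublist).map Prod.fst) hnd
    have hinj : ∀ p ∈ kd, ∀ q ∈ kd, p.1 = q.1 → p = q := by
      intro p hp q hq hpq
      exact List.inj_on_of_nodup_map hnd hp hq hpq
    have hmemM : ∀ p ∈ kd, (p.1 ∈ pvMatchDict c kd ↔ pvMatches c p = true) := by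
      intro p hp
      rw [pvMatchDict_eq]
      constructor
      · intro hc
        rcases List.mem_map.mp hc with ⟨q, hqf, hq1⟩
        rcases List.mem_filter.mp hqf with ⟨hqkd, hqm⟩
        rwa [hinj q hqkd p hp hq1] at hqm
      · intro h
        exact List.mem_map.mpr ⟨p, List.mem_filter.mpr ⟨hp, h⟩, rfl⟩
    set res' := res ++ (pvMatchDict c kd).filter (fun a => !res.contains a) with hres'
    have hstep : (pvMatchDict c kd).foldl pvIns res = res' := pvIns_fold _ res hMnd
    have hpt : ∀ p ∈ kd, (!res'.contains p.1) = (!res.contains p.1 && !pvMatches c p) := by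
      intro p hp
      have hres'mem : p.1 ∈ res' ↔ (p.1 ∈ res ∨ (pvMatches c p = true ∧ p.1 ∉ res)) := by
        simp [hres', hmemM p hp]
      cases hm : pvMatches c p <;> by_cases hr : p.1 ∈ res <;> simp_all
    have hfilters : kd.filter (fun p => !res'.contains p.1)
        = (kd.filter (fun p => !res.contains p.1)).filter (fun p => !pvMatches c p) := by
      rw [List.filter_filter]
      apply List.filter_congr
      intro p hp
      rw [hpt p hp]
      exact Bool.and_comm _ _
    have hmfilter : (pvMatchDict c kd).filter (fun a => !res.contains a)
        = ((kd.filter (fun p => !res.contains p.1)).filter (pvMatches c)).map Prod.fst := by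
      rw [pvMatchDict_eq, pv_filter_map_fst (fun a => !res.contains a) (kd.filter (pvMatches c)),
        List.filter_filter, List.filter_filter]
      congr 1
      apply List.filter_congr
      intro p _
      exact Bool.and_comm _ _
    calc (c :: cs).foldl (fun r c => (pvMatchDict c kd).foldl pvIns r) res
        = cs.foldl (fun r c => (pvMatchDict c kd).foldl pvIns r) res' := by
          rw [List.foldl_cons, hstep]
      _ = res' ++ pvSpecRef cs (kd.filter (fun p => !res'.contains p.1)) := ih kd res' hnd
      _ = res ++ pvSpecRef (c :: cs) (kd.filter (fun p => !res.contains p.1)) := by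
          rw [hfilters, hres', hmfilter, List.append_assoc]
          rfl

-- ===== VERDICT (by name: the statement is the Claim_ definition above) =====
theorem match_dict_comments_py_spec : Claim_equal_match_dict_comments_py := by
  intro comments keyword_dict _ hpre
  show match_dict_comments_py comments keyword_dict = match_dict_comments_py_alt comments keyword_dict
  rw [pvB_spec]
  unfold match_dict_comments_py
  rw [pvA_main comments keyword_dict [] hpre]
  simp
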